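-- pv_equiv track=rewrite | github.com/EauDeData/boe_graph_reconstruction | src/data/datasets.py | split_string_n_chunks
-- ===== SOURCE A (Python) =====
-- def split_string_n_chunks(s, n):
--     if n <= 0:
--         raise ValueError("Number of chunks must be greater than 0")
--     chunk_size = len(s) // n
--     remainder = len(s) % n
--
--     chunks = []
--     start = 0
--     for i in range(n):
--         end = start + chunk_size + (1 if i < remainder else 0)
--         chunks.append(s[start:end])
--         start = end
--
--     return chunks
-- ===== SOURCE B (Python) =====
-- def split_string_n_chunks(s, n):
--     if n <= 0:
--         raise ValueError("Number of chunks must be greater than 0")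
--     chunks = []
--     rest = s
--     k = n
--     while k > 1:
--         cut = -(-len(rest) // k)  # ceil(len(rest)/k): peel the largest balanced chunk
--         chunks.append(rest[:cut])
--         rest = rest[cut:]
--         k -= 1
--     chunks.append(rest)
--     return chunks
-- ===== Notes on version B (the rewrite author's own statement) =====
-- stated objective: alternative
-- what changed: Replaces the pass that precomputes divmod(len(s), n) once and threads a running start index through a range loop with a peeling algorithm: it repeatedly cuts a ceil(len(rest)/k) prefix off the remaining suffix while counting k down, so it computes no quotient/remainder pair and no absolute chunk boundaries at all and consumes the string instead of indexing it.
import Mathlib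
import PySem

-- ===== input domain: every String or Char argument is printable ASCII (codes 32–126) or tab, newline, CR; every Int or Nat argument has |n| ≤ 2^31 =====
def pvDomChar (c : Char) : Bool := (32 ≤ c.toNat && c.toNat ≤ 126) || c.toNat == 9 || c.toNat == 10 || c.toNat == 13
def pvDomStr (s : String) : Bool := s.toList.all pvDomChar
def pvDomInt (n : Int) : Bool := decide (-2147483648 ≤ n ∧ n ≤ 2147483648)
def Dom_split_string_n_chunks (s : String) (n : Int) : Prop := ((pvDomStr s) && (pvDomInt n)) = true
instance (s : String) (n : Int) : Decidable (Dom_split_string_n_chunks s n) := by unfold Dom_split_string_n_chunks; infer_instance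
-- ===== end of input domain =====

-- B replaces A's precomputed divmod + running-start range loop by peeling a ceil-sized prefix
-- off the remaining suffix while counting the chunk count down (objective: alternative).

-- ===== PORT A =====
def split_string_n_chunks (s : String) (n : Int) : List String :=
  -- n <= 0  raises ValueError; excluded by Pre_
  let chunk_size := PySem.Int.floordiv (PySem.Str.len s) n
  let remainder := PySem.Int.mod (PySem.Str.len s) n
  let res := (PySem.List.pyRange 0 n 1).foldl
    (fun (st : Int × List String) i =>
      let e := st.1 + chunk_size + (if i < remainder then 1 else 0)
      (e, st.2 ++ [PySem.Str.slice s (some st.1) (some e)]))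
    (0, ([] : List String))
  res.2

-- ===== PORT B =====
-- the while loop 'while k > 1', counting k down; fuel j = k - 1
def splitAltGo (rest : String) (j : Nat) (chunks : List String) : List String :=
  match j, rest, chunks with
  | 0, rest, chunks => chunks ++ [rest]
  | j+1, rest, chunks =>
    let cut := -(PySem.Int.floordiv (-(PySem.Str.len rest)) ((j : Int) + 2))
    splitAltGo (PySem.Str.slice rest (some cut) none) j
      (chunks ++ [PySem.Str.slice rest none (some cut)])

def split_string_n_chunks_alt (s : String) (n : Int) : List String :=
  -- n <= 0 raises ValueError; excluded by Pre_
  splitAltGo s (n.toNat - 1) []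

-- ===== PRECONDITION & SPEC =====
-- A (and B) raise ValueError when n <= 0; Pre_ excludes exactly those inputs.
def Pre_split_string_n_chunks (s : String) (n : Int) : Prop := 0 < n
instance (s : String) (n : Int) : Decidable (Pre_split_string_n_chunks s n) := by
  unfold Pre_split_string_n_chunks; infer_instance

def pvWitness_split_string_n_chunks : String × Int := ("hello", 3)

def Spec_split_string_n_chunks (s : String) (n : Int) (out : List String) : Prop :=
  out = split_string_n_chunks_alt s n
instance (s : String) (n : Int) (out : List String) : Decidable (Spec_split_string_n_chunks s n out) := by
  unfold Spec_split_string_n_chunks; infer_instance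

-- ===== CLAIM (what is proved, stated in full; the proofs are below) =====
def Claim_equal_split_string_n_chunks : Prop := ∀ (s : String) (n : Int),
  Dom_split_string_n_chunks s n → Pre_split_string_n_chunks s n →
  Spec_split_string_n_chunks s n (split_string_n_chunks s n)

-- ===== LEMMAS AND PROOFS =====

-- canonical chunk list: k chunks of sizes q+1 (first r of them) then q, peeled from the front
def chunksFrom (q : Nat) : Nat → Nat → List Char → List (List Char)
  | _, 0, _ => []
  | r, k+1, cs =>
    cs.take (q + if 0 < r then 1 else 0) ::
      chunksFrom q (r - 1) k (cs.drop (q + if 0 < r then 1 else 0))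

lemma strSlice_eq (s : String) (a? b? : Option Int) :
    PySem.Str.slice s a? b? = String.ofList (PySem.List.slice s.toList a? b?) := by
  have h := PySem.Str.toList_slice s a? b?
  rw [PySem.Chars.slice_eq_listSlice] at h
  rw [← h, String.ofList_toList]

-- A's loop, generalized: starting at offset `start`, remaining iterations 0..k-1
lemma A_loop (s : String) (q : Nat) :
    ∀ (k : Nat) (r start : Nat) (acc : List String),
    ((PySem.List.pyRange 0 (k : Int) 1).foldl
      (fun (st : Int × List String) i =>
        (st.1 + (q : Int) + (if i < (r : Int) then 1 else 0),
         st.2 ++ [PySem.Str.slice s (some st.1)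
           (some (st.1 + (q : Int) + (if i < (r : Int) then 1 else 0)))]))
      ((start : Int), acc)).2
    = acc ++ (chunksFrom q r k (s.toList.drop start)).map String.ofList := by
  intro k
  induction k with
  | zero =>
    intro r start acc
    simp [PySem.List.pyRange_one_eq_nil, chunksFrom]
  | succ k ih =>
    intro r start acc
    rw [PySem.List.pyRange_one_cons (by exact_mod_cast Nat.succ_pos k)]
    rw [List.foldl_cons]
    -- first iteration: i = 0
    have hc0 : ((0 : Int) < (r : Int)) = (0 < r) := by
      simp
    simp only [hc0]
    set c : Nat := q + if 0 < r then 1 else 0 with hc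
    have hcast : (start : Int) + (q : Int) + (if 0 < r then (1:Int) else 0) = ((start : Int) + (c : Int)) := by
      rw [hc]; by_cases h : 0 < r <;> simp [h] <;> push_cast <;> ring
    rw [hcast]
    -- the produced chunk
    have hchunk : PySem.Str.slice s (some (start : Int)) (some ((start : Int) + (c : Int))) =
        String.ofList ((s.toList.drop start).take c) := by
      rw [strSlice_eq, PySem.List.slice_natCast_add]
    -- remaining iterations: reindex pyRange 1 (k+1) to pyRange 0 k
    have hrange : PySem.List.pyRange ((0:Int)+1) ((k:Int)+1) 1 =
        (PySem.List.pyRange 0 (k : Int) 1).map (fun i => i + 1) := by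
      rw [PySem.List.pyRange_one, PySem.List.pyRange_one]
      simp [List.map_map, Function.comp]
      intro a _; ring
    have hk1 : ((k+1 : Nat) : Int) = (k : Int) + 1 := by push_cast; ring
    rw [hk1, hrange, List.foldl_map]
    have hstep : ∀ (st : Int × List String) (i : Int), 0 ≤ i →
        (fun (st : Int × List String) i =>
          (st.1 + (q : Int) + (if i < (r : Int) then 1 else 0),
           st.2 ++ [PySem.Str.slice s (some st.1)
             (some (st.1 + (q : Int) + (if i < (r : Int) then 1 else 0)))])) st (i + 1)
        = (fun (st : Int × List String) i =>
          (st.1 + (q : Int) + (if i < ((r-1 : Nat) : Int) then 1 else 0),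
           st.2 ++ [PySem.Str.slice s (some st.1)
             (some (st.1 + (q : Int) + (if i < ((r-1 : Nat) : Int) then 1 else 0)))])) st i := by
      intro st i hi
      have : (i + 1 < (r : Int)) = (i < ((r-1 : Nat) : Int)) := by
        have : (i + 1 < (r : Int)) ↔ (i < ((r-1 : Nat) : Int)) := by
          push_cast; omega
        simp [this]
      simp only [this]
    rw [PySem.List.foldl_congr_mem _ _ _ _
      (fun acc' i hi => hstep acc' i ((PySem.List.mem_pyRange_one.mp hi).1))]
    rw [show ((start : Int) + (c : Int)) = (((start + c : Nat)) : Int) from by push_cast; ring]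
    rw [ih (r-1) (start + c)]
    rw [show (((start + c : Nat)) : Int) = (start : Int) + (c : Int) from by push_cast; ring]
    rw [hchunk]
    show _ = acc ++ (chunksFrom q r (k+1) (s.toList.drop start)).map String.ofList
    rw [chunksFrom]
    simp [← hc, List.drop_drop, Nat.add_comm]

-- the value of B's `cut`: ceil of the remaining length over the remaining chunk count
lemma cut_eq (ℓ K : Nat) (hK : 0 < K) :
    -(PySem.Int.floordiv (-(ℓ : Int)) (K : Int)) = ((ℓ / K + if 0 < ℓ % K then 1 else 0 : Nat) : Int) := by
  rw [PySem.Int.neg_floordiv_neg_eq_iff_of_pos (by exact_mod_cast hK)]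
  have hdm := Nat.div_add_mod ℓ K
  have hlt := Nat.mod_lt ℓ hK
  set q := ℓ / K; set r := ℓ % K
  by_cases hr : 0 < r
  · simp only [if_pos hr]
    constructor
    · have h1 : (((q + 1 : Nat) : Int) - 1) * (K : Int) = (q : Int) * (K : Int) := by push_cast; ring
      rw [h1]
      have : (ℓ : Int) = (q : Int) * (K : Int) + (r : Int) := by push_cast [← hdm]; ring
      rw [this]; exact_mod_cast lt_add_of_pos_right _ (by exact_mod_cast hr)
    · have h2 : ((q + 1 : Nat) : Int) * (K : Int) = (q : Int) * (K : Int) + (K : Int) := by push_cast; ring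
      rw [h2]
      have : (ℓ : Int) = (q : Int) * (K : Int) + (r : Int) := by push_cast [← hdm]; ring
      rw [this]
      have : (r : Int) ≤ (K : Int) := by exact_mod_cast Nat.le_of_lt hlt
      linarith
  · have hr0 : r = 0 := by omega
    simp only [if_neg hr, Nat.add_zero]
    have hl : (ℓ : Int) = (q : Int) * (K : Int) := by
      rw [hr0] at hdm; push_cast [← hdm]; ring
    constructor
    · rw [hl]
      have : ((q : Int) - 1) * (K : Int) = (q : Int) * (K : Int) - (K : Int) := by ring
      rw [this]
      have : (0 : Int) < (K : Int) := by exact_mod_cast hK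
      linarith
    · rw [hl]

lemma len_eq_toList (s : String) : PySem.Str.len s = (s.toList.length : Int) := by
  simp [PySem.Str.len_eq]

-- B's loop computes the same canonical chunks
lemma B_loop : ∀ (j : Nat) (rest : String) (chunks : List String),
    splitAltGo rest j chunks
    = chunks ++ (chunksFrom (rest.toList.length / (j+1)) (rest.toList.length % (j+1)) (j+1)
        rest.toList).map String.ofList := by
  intro j
  induction j with
  | zero =>
    intro rest chunks
    rw [splitAltGo, chunksFrom, chunksFrom]
    simp [Nat.mod_one]
    rw [← String.length_toList, List.take_length, String.ofList_toList]
  | succ j ih =>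
    intro rest chunks
    rw [splitAltGo]
    set ℓ := rest.toList.length with hℓ
    set q := ℓ / (j+2) with hq
    set r := ℓ % (j+2) with hr
    set c : Nat := q + if 0 < r then 1 else 0 with hc
    have hcut : -(PySem.Int.floordiv (-(PySem.Str.len rest)) ((j : Int) + 2)) = (c : Int) := by
      rw [len_eq_toList]
      have h2 : ((j : Int) + 2) = ((j + 2 : Nat) : Int) := by push_cast; ring
      rw [h2, ← hℓ, cut_eq ℓ (j+2) (by omega)]
    simp only [hcut]
    have hhead : PySem.Str.slice rest none (some (c : Int)) =
        String.ofList (rest.toList.take c) := by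
      rw [strSlice_eq, PySem.List.slice_to_natCast]
    have htail : (PySem.Str.slice rest (some (c : Int)) none).toList = rest.toList.drop c := by
      rw [strSlice_eq]
      rw [String.toList_ofList, PySem.List.slice_from_natCast]
    have hdm : (j+2) * q + r = ℓ := by rw [hq, hr]; exact Nat.div_add_mod ℓ (j+2)
    have hrlt : r < j + 2 := by rw [hr]; exact Nat.mod_lt ℓ (by omega)
    have hqle : q ≤ (j+2) * q := Nat.le_mul_of_pos_left q (by omega)
    have hcle : c ≤ ℓ := by
      rw [hc]
      by_cases hrp : 0 < r
      · simp only [if_pos hrp]; omega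
      · simp only [if_neg hrp]; omega
    have hlen' : (PySem.Str.slice rest (some (c : Int)) none).toList.length = ℓ - c := by
      rw [htail, List.length_drop]
    -- the remaining length splits as (r-1) + q*(j+1) when r > 0, and q*(j+1) when r = 0
    have hsz : ℓ - c = (r - 1) + q * (j+1) := by
      have hexp : (j+2) * q = q * (j+1) + q := by ring
      rw [hc]
      by_cases hrp : 0 < r
      · simp only [if_pos hrp]; omega
      · simp only [if_neg hrp]; omega
    have hdiv : (ℓ - c) / (j+1) = q := by
      rw [hsz, Nat.add_mul_div_right _ _ (show 0 < j+1 by omega), Nat.div_eq_of_lt (by omega)]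
      omega
    have hmod : (ℓ - c) % (j+1) = r - 1 := by
      rw [hsz, Nat.add_mul_mod_self_right, Nat.mod_eq_of_lt (by omega)]
    rw [ih, hlen', hdiv, hmod, hhead]
    show _ = chunks ++ (chunksFrom q r (j+2) rest.toList).map String.ofList
    conv_rhs => rw [chunksFrom]
    simp [htail, ← hc]

-- ===== VERDICT (by name: the statement is the Claim_ definition above) =====
theorem split_string_n_chunks_spec : Claim_equal_split_string_n_chunks := by
  intro s n _ hn
  unfold Spec_split_string_n_chunks split_string_n_chunks split_string_n_chunks_alt
  have hpre : (0 : Int) < n := hn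
  set m := n.toNat with hm
  have hmpos : 0 < m := by omega
  have hn' : n = (m : Int) := by omega
  obtain ⟨j, hj⟩ : ∃ j, m = j + 1 := ⟨m - 1, by omega⟩
  have hq : PySem.Int.floordiv (PySem.Str.len s) ((m : Nat) : Int) = ((s.toList.length / m : Nat) : Int) := by
    rw [len_eq_toList, PySem.Int.floordiv_natCast]
  have hr : PySem.Int.mod (PySem.Str.len s) ((m : Nat) : Int) = ((s.toList.length % m : Nat) : Int) := by
    rw [len_eq_toList, PySem.Int.mod_natCast]
  simp only [hn', hq, hr]
  have h0 : ((0 : Int), ([] : List String)) = (((0 : Nat) : Int), ([] : List String)) := by norm_num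
  rw [h0, A_loop s (s.toList.length / m) m (s.toList.length % m) 0 []]
  rw [hj] at hmpos ⊢
  have : (j + 1) - 1 = j := by omega
  rw [this, B_loop j s []]
  simp
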